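-- pv_equiv track=rewrite | github.com/ad-str/huge-leetcode-guy | OA Prep/MessageDeliverySystem.py | messageDeliveryService
-- ===== SOURCE A (Python) =====
-- from collections import defaultdict
--
-- def messageDeliveryService(timestamps: list[int], messages: list[str], k: int):
--     res = [False] * len(timestamps)
--     lastArrived = defaultdict(int)
--
--     for i, message in enumerate(messages):
--         if message not in lastArrived or lastArrived[message] + k < timestamps[i]:
--             res[i] = True
--         lastArrived[message] = timestamps[i]
--
--     return res
-- ===== SOURCE B (Python) =====
-- def messageDeliveryService(timestamps: list[int], messages: list[str], k: int):
--     positions = {}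
--     for i, message in enumerate(messages):
--         positions.setdefault(message, []).append(i)
--     res = [False] * len(timestamps)
--     for idxs in positions.values():
--         prev = None
--         for i in idxs:
--             if prev is None or prev + k < timestamps[i]:
--                 res[i] = True
--             prev = timestamps[i]
--     return res
-- ===== Notes on version B (the rewrite author's own statement) =====
-- stated objective: alternative
-- what changed: Replaced A's single forward pass that updates a last-arrival dict per message with a two-phase group-by algorithm: first build an index table mapping each message to its list of positions, then fill the result per group by walking each position list with a previous-timestamp accumulator; Pre_ excludes inputs with more messages than timestamps, on which A raises IndexError.
import Mathlib
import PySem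

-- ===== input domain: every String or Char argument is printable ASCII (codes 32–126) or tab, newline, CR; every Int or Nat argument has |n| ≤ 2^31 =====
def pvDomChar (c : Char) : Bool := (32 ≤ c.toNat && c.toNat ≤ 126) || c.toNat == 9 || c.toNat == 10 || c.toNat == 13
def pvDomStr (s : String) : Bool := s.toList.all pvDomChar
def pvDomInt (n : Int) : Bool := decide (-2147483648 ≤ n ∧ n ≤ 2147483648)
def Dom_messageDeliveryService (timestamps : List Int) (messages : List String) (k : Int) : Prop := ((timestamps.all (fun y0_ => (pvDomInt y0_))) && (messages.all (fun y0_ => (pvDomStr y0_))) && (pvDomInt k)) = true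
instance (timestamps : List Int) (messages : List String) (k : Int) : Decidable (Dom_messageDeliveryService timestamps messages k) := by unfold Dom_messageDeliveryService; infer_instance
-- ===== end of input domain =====

-- B replaces A's single forward pass with a last-arrival dict by a two-phase group-by:
-- build an index table message -> positions, then fill the result per group
-- (objective: alternative decomposition, same cost).

-- ===== PORT A =====
-- A's loop body: condition 'message not in lastArrived or lastArrived[message] + k < timestamps[i]',
-- then res[i] = True, then lastArrived[message] = timestamps[i].
def msgStepA (ts : List Int) (k : Int) (st : List Bool × PySem.Dict String Int)
    (p : Int × String) : List Bool × PySem.Dict String Int :=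
  let i := p.1
  let m := p.2
  let cond : Bool :=
    match st.2.get? m with
    | none => true                                   -- message not in lastArrived
    | some v => decide (v + k < PySem.List.pyGetD ts i 0)  -- timestamps[i]; in range under Pre_
  let res := if cond then PySem.List.pySetD st.1 i true else st.1
  (res, st.2.insert m (PySem.List.pyGetD ts i 0))

def messageDeliveryService (timestamps : List Int) (messages : List String) (k : Int) : List Bool :=
  ((PySem.List.enumerate messages 0).foldl (msgStepA timestamps k)
    (List.replicate timestamps.length false, PySem.Dict.empty)).1

-- ===== PORT B =====
-- phase 1: 'for i, message in enumerate(messages): positions.setdefault(message, []).append(i)'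
def buildPos (messages : List String) : PySem.Dict String (List Int) :=
  (PySem.List.enumerate messages 0).foldl
    (fun d p => d.modify p.2 [] (fun l => l ++ [p.1])) PySem.Dict.empty

-- phase 2 inner loop: 'prev = None; for i in idxs: if prev is None or prev + k < timestamps[i]: res[i] = True; prev = timestamps[i]'
def scanGroup (ts : List Int) (k : Int) (res : List Bool) (idxs : List Int) : List Bool :=
  (idxs.foldl
    (fun (st : List Bool × Option Int) i =>
      let t := PySem.List.pyGetD ts i 0              -- timestamps[i]; in range under Pre_
      ((match st.2 with
        | none => PySem.List.pySetD st.1 i true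
        | some p => if p + k < t then PySem.List.pySetD st.1 i true else st.1), some t))
    (res, none)).1

def messageDeliveryService_alt (timestamps : List Int) (messages : List String) (k : Int) : List Bool :=
  ((buildPos messages).values).foldl (scanGroup timestamps k)
    (List.replicate timestamps.length false)

-- ===== PRECONDITION & SPEC =====
-- Pre_ excludes exactly the inputs on which A raises IndexError (timestamps[i] for i ≥ len(timestamps)).
def Pre_messageDeliveryService (timestamps : List Int) (messages : List String) (k : Int) : Prop :=
  messages.length ≤ timestamps.length
instance (timestamps : List Int) (messages : List String) (k : Int) : Decidable (Pre_messageDeliveryService timestamps messages k) := by unfold Pre_messageDeliveryService; infer_instance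

def pvWitness_messageDeliveryService : List Int × List String × Int := ([1, 5, 10], ["a", "b", "a"], 3)

def Spec_messageDeliveryService (timestamps : List Int) (messages : List String) (k : Int) (out : List Bool) : Prop := out = messageDeliveryService_alt timestamps messages k
instance (timestamps : List Int) (messages : List String) (k : Int) (out : List Bool) : Decidable (Spec_messageDeliveryService timestamps messages k out) := by unfold Spec_messageDeliveryService; infer_instance

-- ===== CLAIM (what is proved, stated in full; the proofs are below) =====
def Claim_equal_messageDeliveryService : Prop := ∀ (timestamps : List Int) (messages : List String) (k : Int), Dom_messageDeliveryService timestamps messages k → Pre_messageDeliveryService timestamps messages k → Spec_messageDeliveryService timestamps messages k (messageDeliveryService timestamps messages k)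

-- ===== LEMMAS AND PROOFS =====

-- the last index j < t with msgs[j] = m (A's lastArrived is timestamps at this index)
def prevOcc (msgs : List String) (m : String) : Nat → Option Nat
  | 0 => none
  | j + 1 => if msgs.getD j "" == m then some j else prevOcc msgs m j

-- the common per-index answer both programs compute
def allowedB (ts : List Int) (msgs : List String) (k : Int) (i : Nat) : Bool :=
  match prevOcc msgs (msgs.getD i "") i with
  | none => true
  | some j => decide (ts.getD j 0 + k < ts.getD i 0)

-- pointwise characterisation both sides are reduced to
def charMap (ts : List Int) (msgs : List String) (k : Int) : List Bool :=
  (List.range ts.length).map (fun i =>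
    if i < msgs.length then allowedB ts msgs k i else false)

-- indices j < t at which message m occurs, in increasing order
def occsUpTo (msgs : List String) (m : String) (t : Nat) : List Nat :=
  (List.range t).filter (fun j => msgs.getD j "" == m)

def grpI (msgs : List String) (m : String) : List Int :=
  (occsUpTo msgs m msgs.length).map (fun n : Nat => (n : Int))

lemma grpI_eq (msgs : List String) (m : String) :
    grpI msgs m = (occsUpTo msgs m msgs.length).map (fun n : Nat => (n : Int)) := rfl

-- value a group scan assigns at i, given the previous group timestamp p
def chainCond (ts : List Int) (k : Int) : Int → List Nat → Nat → Bool
  | _, [], _ => false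
  | p, j :: L, i => if i = j then decide (p + k < ts.getD j 0) else chainCond ts k (ts.getD j 0) L i

-- value a group scan assigns at i ∈ M (true for the head of the group)
def gAllowed (ts : List Int) (k : Int) : List Nat → Nat → Bool
  | [], _ => false
  | j :: L, i => if i = j then true else chainCond ts k (ts.getD j 0) L i

-- Nat-index form of scanGroup's loop after the head has been consumed
def natScan (ts : List Int) (k : Int) : List Nat → List Bool → Int → List Bool
  | [], res, _ => res
  | j :: L, res, p =>
      natScan ts k L (if p + k < ts.getD j 0 then res.set j true else res) (ts.getD j 0)

lemma mem_occsUpTo (msgs : List String) (m : String) (t i : Nat) :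
    i ∈ occsUpTo msgs m t ↔ i < t ∧ msgs.getD i "" = m := by
  simp [occsUpTo, List.mem_filter, List.mem_range]

-- setting index t of a mapped range updates the function pointwise
lemma set_range_map (n t : Nat) (f : Nat → Bool) (v : Bool) (ht : t < n) :
    ((List.range n).map f).set t v = (List.range n).map (fun i => if i = t then v else f i) := by
  apply List.ext_getElem
  · simp
  · intro i h1 h2
    simp only [List.getElem_set, List.getElem_map, List.getElem_range]
    by_cases h : t = i
    · simp [h]
    · have h' : ¬ i = t := fun e => h e.symm
      simp [h, h']

-- ===== A-side: the forward pass computes charMap =====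
lemma msgLoopA (ts : List Int) (k : Int) (msgs : List String)
    (hlen : msgs.length ≤ ts.length) :
    ∀ (rest : List String) (t : Nat), t ≤ msgs.length →
      msgs.drop t = rest →
      ∀ (res : List Bool) (d : PySem.Dict String Int),
      res = (List.range ts.length).map (fun i => if i < t then allowedB ts msgs k i else false) →
      (∀ m, d.get? m = (prevOcc msgs m t).map (fun j => ts.getD j 0)) →
      ((PySem.List.enumerate rest (t : Int)).foldl (msgStepA ts k) (res, d)).1 =
        charMap ts msgs k := by
  intro rest
  induction rest with
  | nil =>
    intro t ht hdrop res d hres hd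
    have ht' : t = msgs.length := by
      have := congrArg List.length hdrop
      simp at this; omega
    subst ht'
    simp only [PySem.List.enumerate_nil, List.foldl_nil]
    rw [hres]; rfl
  | cons x xs ih =>
    intro t ht hdrop res d hres hd
    have htlt : t < msgs.length := by
      have := congrArg List.length hdrop
      simp at this; omega
    have hx : msgs.getD t "" = x := by
      have h0 : (msgs.drop t)[0]? = some x := by rw [hdrop]; rfl
      rw [List.getElem?_drop] at h0
      have h0' : msgs[t]? = some x := by simpa using h0
      simp [List.getD_eq_getElem?_getD, h0']
    have hdrop1 : msgs.drop (t + 1) = xs := by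
      rw [← List.drop_drop, hdrop]; rfl
    rw [PySem.List.enumerate_cons, List.foldl_cons]
    have hcond : (match d.get? x with
        | none => true
        | some v => decide (v + k < ts.getD t 0)) = allowedB ts msgs k t := by
      rw [hd x]
      unfold allowedB
      rw [hx]
      cases prevOcc msgs x t with
      | none => rfl
      | some j => rfl
    have hstep : msgStepA ts k (res, d) ((t : Int), x) =
        ((List.range ts.length).map (fun i => if i < t + 1 then allowedB ts msgs k i else false),
         d.insert x (ts.getD t 0)) := by
      unfold msgStepA
      simp only [PySem.List.pySetD_natCast, PySem.List.pyGetD_natCast]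
      congr 1
      rw [hcond]
      by_cases hc : allowedB ts msgs k t = true
      · rw [if_pos hc, hres, set_range_map _ _ _ _ (by omega)]
        apply List.map_congr_left
        intro i hi
        by_cases hit : i = t
        · subst hit; simp [hc]
        · by_cases h : i < t
          · simp [hit, h, Nat.lt_succ_of_lt h]
          · simp [hit, h, show ¬ i < t + 1 from by omega]
      · rw [Bool.not_eq_true] at hc
        rw [if_neg (by simp [hc])]
        rw [hres]
        apply List.map_congr_left
        intro i hi
        by_cases hit : i = t
        · subst hit; simp [hc]
        · by_cases h : i < t
          · simp [h, Nat.lt_succ_of_lt h]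
          · simp [h, show ¬ i < t + 1 from by omega]
    rw [hstep]
    have : ((t : Int) + 1) = ((t + 1 : Nat) : Int) := by push_cast; ring
    rw [this]
    apply ih (t + 1) (by omega) hdrop1
    · rfl
    · intro m
      rw [PySem.Dict.get?_insert]
      show _ = (prevOcc msgs m (t + 1)).map (fun j => ts.getD j 0)
      unfold prevOcc
      rw [hx]
      by_cases hm : m = x
      · subst hm; simp
      · have hbe : (x == m) = false := by simp [Ne.symm hm]
        rw [hbe]
        simp only [if_neg hm, Bool.false_eq_true, if_false]
        exact hd m

-- ===== B-side: the grouped pass computes charMap =====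

-- the port's inner foldl with a some-state is natScan
lemma portScan_eq (ts : List Int) (k : Int) :
    ∀ (L : List Nat) (res : List Bool) (p : Int),
    ((L.map (fun n : Nat => (n : Int))).foldl
      (fun (st : List Bool × Option Int) i =>
        let t := PySem.List.pyGetD ts i 0
        ((match st.2 with
          | none => PySem.List.pySetD st.1 i true
          | some q => if q + k < t then PySem.List.pySetD st.1 i true else st.1), some t))
      (res, some p)).1 = natScan ts k L res p := by
  intro L
  induction L with
  | nil => intro res p; rfl
  | cons j L ih =>
    intro res p
    simp only [List.map_cons, List.foldl_cons, PySem.List.pyGetD_natCast,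
      PySem.List.pySetD_natCast, natScan]
    split_ifs with h
    · rw [← ih (res.set j true) (ts.getD j 0)]
    · rw [← ih res (ts.getD j 0)]

lemma natScan_length (ts : List Int) (k : Int) :
    ∀ (L : List Nat) (res : List Bool) (p : Int), (natScan ts k L res p).length = res.length := by
  intro L
  induction L with
  | nil => intro res p; rfl
  | cons j L ih =>
    intro res p
    simp only [natScan]
    rw [ih]
    split_ifs <;> simp

lemma natScan_get_not_mem (ts : List Int) (k : Int) :
    ∀ (L : List Nat) (res : List Bool) (p : Int) (i : Nat), i ∉ L →
    (natScan ts k L res p)[i]? = res[i]? := by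
  intro L
  induction L with
  | nil => intro res p i _; rfl
  | cons j L ih =>
    intro res p i hi
    simp only [List.mem_cons, not_or] at hi
    simp only [natScan]
    rw [ih _ _ _ hi.2]
    split_ifs with h
    · exact List.getElem?_set_ne (fun e => hi.1 e.symm)
    · rfl

lemma natScan_get_mem (ts : List Int) (k : Int) :
    ∀ (L : List Nat) (res : List Bool) (p : Int) (i : Nat), L.Nodup →
    (∀ j ∈ L, j < res.length) → i ∈ L →
    (natScan ts k L res p)[i]? = if chainCond ts k p L i then some true else res[i]? := by
  intro L
  induction L with
  | nil => intro _ _ _ _ _ hi; cases hi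
  | cons j L ih =>
    intro res p i hnd hlen hi
    have hndL : L.Nodup := (List.nodup_cons.mp hnd).2
    have hjL : j ∉ L := (List.nodup_cons.mp hnd).1
    by_cases hij : i = j
    · subst hij
      simp only [natScan, chainCond]
      rw [natScan_get_not_mem ts k L _ _ i hjL]
      by_cases h : p + k < ts.getD i 0
      · rw [if_pos h, if_pos (by simpa using h),
          List.getElem?_set_self (hlen i (by simp))]
      · rw [if_neg h, if_neg (by simpa using h)]
    · have hiL : i ∈ L := by
        rcases List.mem_cons.mp hi with h | h
        · exact absurd h hij
        · exact h
      simp only [natScan, chainCond, if_neg hij]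
      rw [ih _ _ i hndL (fun a ha => by
        have := hlen a (List.mem_cons_of_mem _ ha)
        split_ifs <;> simpa using this) hiL]
      split_ifs with h1 h2
      · rfl
      · exact List.getElem?_set_ne (fun e => hij e.symm)
      · rfl

lemma scanGroup_length (ts : List Int) (k : Int) (res : List Bool) (M : List Nat) :
    (scanGroup ts k res (M.map (fun n : Nat => (n : Int)))).length = res.length := by
  cases M with
  | nil => rfl
  | cons j L =>
    unfold scanGroup
    simp only [List.map_cons, List.foldl_cons, PySem.List.pyGetD_natCast,
      PySem.List.pySetD_natCast]
    rw [portScan_eq, natScan_length]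
    simp

lemma scanGroup_get (ts : List Int) (k : Int) (res : List Bool) (M : List Nat)
    (hnd : M.Nodup) (hlen : ∀ j ∈ M, j < res.length) (i : Nat) :
    (scanGroup ts k res (M.map (fun n : Nat => (n : Int))))[i]? =
      if i ∈ M ∧ gAllowed ts k M i then some true else res[i]? := by
  cases M with
  | nil => simp [scanGroup]
  | cons j L =>
    have hndL : L.Nodup := (List.nodup_cons.mp hnd).2
    have hjL : j ∉ L := (List.nodup_cons.mp hnd).1
    unfold scanGroup
    simp only [List.map_cons, List.foldl_cons, PySem.List.pyGetD_natCast,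
      PySem.List.pySetD_natCast]
    rw [portScan_eq]
    by_cases hij : i = j
    · subst hij
      rw [natScan_get_not_mem ts k L _ _ i hjL,
        List.getElem?_set_self (hlen i (by simp))]
      simp [gAllowed]
    · have hset : (res.set j true)[i]? = res[i]? :=
        List.getElem?_set_ne (fun e => hij e.symm)
      by_cases hiL : i ∈ L
      · rw [natScan_get_mem ts k L _ _ i hndL (fun a ha => by
          have := hlen a (List.mem_cons_of_mem _ ha); simpa using this) hiL, hset]
        have : (i ∈ j :: L ∧ gAllowed ts k (j :: L) i = true) ↔ chainCond ts k (ts.getD j 0) L i = true := by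
          simp [gAllowed, hij, hiL]
        by_cases hc : chainCond ts k (ts.getD j 0) L i = true
        · rw [if_pos hc, if_pos (this.mpr hc)]
        · rw [if_neg hc, if_neg (fun h => hc (this.mp h))]
      · rw [natScan_get_not_mem ts k L _ _ i hiL, hset]
        rw [if_neg (by simp [hij, hiL])]

-- effect of the whole per-group phase, pointwise
lemma foldGroups_get (ts : List Int) (msgs : List String) (k : Int) :
    ∀ (K : List String), K.Nodup → ∀ (res : List Bool), res.length = ts.length →
      msgs.length ≤ ts.length → ∀ i,
    ((K.foldl (fun r m => scanGroup ts k r (grpI msgs m)) res))[i]? =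
      if i < msgs.length ∧ msgs.getD i "" ∈ K ∧
          gAllowed ts k (occsUpTo msgs (msgs.getD i "") msgs.length) i then some true
      else res[i]? := by
  intro K
  induction K with
  | nil => intro _ res _ _ i; simp
  | cons m K ih =>
    intro hnd res hreslen hlen i
    have hndK : K.Nodup := (List.nodup_cons.mp hnd).2
    have hmK : m ∉ K := (List.nodup_cons.mp hnd).1
    simp only [List.foldl_cons]
    have hOcc : ∀ a ∈ occsUpTo msgs m msgs.length, a < res.length := by
      intro a ha
      have := (mem_occsUpTo msgs m msgs.length a).mp ha
      omega
    have hscanlen : (scanGroup ts k res (grpI msgs m)).length = ts.length := by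
      rw [grpI_eq, scanGroup_length]; exact hreslen
    rw [ih hndK _ hscanlen hlen i, grpI_eq,
      scanGroup_get ts k res (occsUpTo msgs m msgs.length)
        (by unfold occsUpTo; exact List.Nodup.filter _ List.nodup_range) hOcc i]
    by_cases hlt : i < msgs.length
    · by_cases hm : msgs.getD i "" = m
      · have hK : msgs.getD i "" ∉ K := by rw [hm]; exact hmK
        have hiO : i ∈ occsUpTo msgs m msgs.length := (mem_occsUpTo _ _ _ _).mpr ⟨hlt, hm⟩
        simp only [hK, and_false, false_and, and_false, if_false] -- kill the K-branch
        rw [hm]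
        by_cases hg : gAllowed ts k (occsUpTo msgs m msgs.length) i = true
        · simp [hlt, hiO, hg]
        · simp [hlt, hiO, hg]
      · have hiO : i ∉ occsUpTo msgs m msgs.length := fun h =>
          hm ((mem_occsUpTo _ _ _ _).mp h).2
        simp only [hiO, false_and, if_false]
        have hmm : (msgs.getD i "" ∈ m :: K) ↔ (msgs.getD i "" ∈ K) :=
          ⟨fun hc => (List.mem_cons.mp hc).resolve_left hm,
           fun hc => List.mem_cons_of_mem _ hc⟩
        simp only [hmm]
    · have hiO : i ∉ occsUpTo msgs m msgs.length := fun h => by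
        have := (mem_occsUpTo _ _ _ _).mp h; omega
      simp [hlt, hiO]

-- the index table: entry for m is the occurrence list of m
-- the grouped fold, with the pair components swapped into getD_foldl_modify_append's shape
lemma getD_foldl_modify_append_swap (l : List (Int × String)) (d : PySem.Dict String (List Int)) (c : String) :
    (l.foldl (fun d p => d.modify p.2 [] (fun v => v ++ [p.1])) d).getD c [] =
      d.getD c [] ++ (l.filter (fun p => p.2 == c)).map (fun p => p.1) := by
  have h := PySem.Dict.getD_foldl_modify_append (l.map (fun p => (p.2, p.1))) d c
  rw [List.foldl_map, List.filter_map, List.map_map] at h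
  exact h

lemma buildPos_getD (msgs : List String) (m : String) :
    (buildPos msgs).getD m [] = grpI msgs m := by
  unfold buildPos
  rw [getD_foldl_modify_append_swap, PySem.Dict.getD_empty, List.nil_append]
  have he : PySem.List.enumerate msgs 0
      = (List.range msgs.length).map (fun j : Nat => ((j : Int), msgs.getD j "")) := by
    rw [show PySem.List.enumerate msgs 0 = PySem.List.enumerate msgs from rfl,
      PySem.List.enumerate_eq_map_pyRange msgs "",
      show PySem.List.len msgs = ((msgs.length : Nat) : Int) from by simp [PySem.List.len],
      PySem.List.pyRange_zero_natCast, List.map_map]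
    apply List.map_congr_left
    intro j _
    simp [Function.comp]
  rw [he, List.filter_map, List.map_map]
  rfl

lemma buildPos_keys (msgs : List String) :
    (buildPos msgs).keys = PySem.Set.ofList msgs := by
  unfold buildPos
  rw [PySem.Dict.keys_foldl_modify_key (PySem.List.enumerate msgs 0) (fun p => p.2) []
    (fun _ p => fun v => v ++ [p.1]) PySem.Dict.empty]
  rw [PySem.Dict.keys_empty, PySem.Set.update_nil_left, PySem.List.map_snd_enumerate]

lemma buildPos_values (msgs : List String) :
    (buildPos msgs).values = (PySem.Set.ofList msgs).map (fun m => grpI msgs m) := by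
  have hnd : (buildPos msgs).keys.Nodup := by
    rw [buildPos_keys]; exact PySem.Set.nodup_ofList msgs
  rw [PySem.Dict.values_eq_map_keys (buildPos msgs) hnd [], buildPos_keys]
  apply List.map_congr_left
  intro m _
  exact buildPos_getD msgs m

-- prevOcc is the last element of the occurrence list below i
lemma prevOcc_eq_getLast (msgs : List String) (m : String) :
    ∀ t, prevOcc msgs m t = (occsUpTo msgs m t).getLast? := by
  intro t
  induction t with
  | zero => rfl
  | succ t ih =>
    have hval : msgs[t]?.getD "" = msgs.getD t "" := List.getD_eq_getElem?_getD.symm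
    have hstep : prevOcc msgs m (t + 1)
        = if msgs.getD t "" == m then some t else prevOcc msgs m t := rfl
    by_cases h : msgs.getD t "" = m
    · have hb : msgs[t]?.getD "" = m := hval.trans h
      have hocc : occsUpTo msgs m (t + 1) = occsUpTo msgs m t ++ [t] := by
        simp [occsUpTo, List.range_succ, hb]
      rw [hstep, if_pos (by simp [hb]), hocc, List.getLast?_concat]
    · have hb : ¬ msgs[t]?.getD "" = m := fun e => h (hval.symm.trans e)
      have hocc : occsUpTo msgs m (t + 1) = occsUpTo msgs m t := by
        simp [occsUpTo, List.range_succ, hb]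
      rw [hstep, if_neg (by simp [hb]), hocc, ih]

-- the occurrence list up to n splits at an occurrence i
lemma occs_split (msgs : List String) (m : String) (i n : Nat)
    (hi : i < n) (hm : msgs.getD i "" = m) :
    ∃ suf, occsUpTo msgs m n = occsUpTo msgs m i ++ i :: suf := by
  refine ⟨(List.range' (i + 1) (n - (i + 1))).filter (fun j => msgs.getD j "" == m), ?_⟩
  have hr : List.range n = List.range (i + 1) ++ List.range' (i + 1) (n - (i + 1)) := by
    rw [List.range_eq_range', List.range_eq_range']
    have h2 := List.range'_append (s := 0) (m := i + 1) (n := n - (i + 1)) (step := 1)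
    simp only [Nat.one_mul, Nat.zero_add] at h2
    have hn : i + 1 + (n - (i + 1)) = n := by omega
    rw [hn] at h2
    exact h2.symm
  unfold occsUpTo
  rw [hr, List.filter_append, List.range_succ, List.filter_append, List.filter_cons,
    List.filter_nil]
  rw [show (msgs.getD i "" == m) = true from by simpa using hm]
  simp

lemma chainCond_concat (ts : List Int) (k : Int) (a i : Nat) (suf : List Nat) :
    ∀ (pre : List Nat) (p : Int), i ∉ pre → i ≠ a →
    chainCond ts k p (pre ++ a :: i :: suf) i = decide (ts.getD a 0 + k < ts.getD i 0) := by
  intro pre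
  induction pre with
  | nil =>
    intro p _ hia
    simp [chainCond, hia]
  | cons x pre ih =>
    intro p hi hia
    simp only [List.mem_cons, not_or] at hi
    simp only [List.cons_append, chainCond, if_neg hi.1]
    exact ih _ hi.2 hia

lemma gAllowed_eq_allowedB (ts : List Int) (msgs : List String) (k : Int) (i : Nat)
    (hi : i < msgs.length) :
    gAllowed ts k (occsUpTo msgs (msgs.getD i "") msgs.length) i = allowedB ts msgs k i := by
  set m := msgs.getD i "" with hm
  obtain ⟨suf, hsplit⟩ := occs_split msgs m i msgs.length hi rfl
  have hlt : ∀ a ∈ occsUpTo msgs m i, a < i := fun a ha =>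
    ((mem_occsUpTo _ _ _ _).mp ha).1
  unfold allowedB
  rw [← hm, prevOcc_eq_getLast, hsplit]
  rcases List.eq_nil_or_concat (occsUpTo msgs m i) with hnil | ⟨pre, a, hconc⟩
  · rw [hnil]
    simp [gAllowed]
  · rw [List.concat_eq_append] at hconc
    rw [hconc]
    have hia : i ≠ a := by
      have := hlt a (by rw [hconc]; simp)
      omega
    have hipre : i ∉ pre := fun h => by
      have := hlt i (by rw [hconc]; simp [h])
      omega
    rw [List.getLast?_concat]
    cases pre with
    | nil =>
      simp [gAllowed, chainCond, hia]
    | cons x pre' =>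
      have hix : i ≠ x := fun h => hipre (by simp [h])
      have hipre' : i ∉ pre' := fun h => hipre (by simp [h])
      simp only [List.cons_append, List.append_assoc, gAllowed, if_neg hix]
      exact chainCond_concat ts k a i suf _ _ (by simp [hipre']) hia

-- B computes charMap
lemma altEqChar (ts : List Int) (msgs : List String) (k : Int)
    (hlen : msgs.length ≤ ts.length) :
    messageDeliveryService_alt ts msgs k = charMap ts msgs k := by
  apply List.ext_getElem?
  intro i
  unfold messageDeliveryService_alt
  rw [buildPos_values, List.foldl_map]
  rw [foldGroups_get ts msgs k _ (PySem.Set.nodup_ofList msgs) _ (by simp) hlen i]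
  unfold charMap
  by_cases hts : i < ts.length
  · rw [List.getElem?_map]
    simp only [List.getElem?_range hts, Option.map_some]
    by_cases hlt : i < msgs.length
    · have hmem : msgs.getD i "" ∈ PySem.Set.ofList msgs := by
        rw [PySem.Set.mem_ofList]
        rw [List.getD_eq_getElem?_getD, List.getElem?_eq_getElem hlt]
        exact List.getElem_mem hlt
      rw [gAllowed_eq_allowedB ts msgs k i hlt]
      by_cases hall : allowedB ts msgs k i = true
      · simp [hlt, hmem, hall]
      · simp [hlt, hmem, hall, hts]
    · simp [hlt, hts]
  · have h1 : ¬ i < msgs.length := by omega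
    simp [hts, h1, List.getElem?_replicate,
      List.getElem?_eq_none (by simp; omega : ((List.range ts.length).map (fun i =>
        if i < msgs.length then allowedB ts msgs k i else false)).length ≤ i)]

-- ===== VERDICT (by name: the statement is the Claim_ definition above) =====
theorem messageDeliveryService_spec : Claim_equal_messageDeliveryService := by
  intro ts msgs k _ hpre
  show messageDeliveryService ts msgs k = messageDeliveryService_alt ts msgs k
  rw [altEqChar ts msgs k hpre]
  unfold messageDeliveryService
  have h0 : (0 : Int) = ((0 : Nat) : Int) := rfl
  rw [h0]
  apply msgLoopA ts k msgs hpre msgs 0 (by omega) (by simp)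
  · simp
  · intro m; simp [PySem.Dict.get?_empty, prevOcc]
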